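-- pv_equiv track=rewrite | github.com/plumedrift/Project3 | Problem3.py | create_numbers
-- ===== SOURCE A (Python) =====
-- def create_numbers(input_list):
--     first, second = 0, 0
--     n = len(input_list)
--
--     for i in range(n - 1, -1, -1):  # O(n)
--         if i % 2 == 0:
--             first = first * 10 + input_list[i]
--         else:
--             second = second * 10 + input_list[i]
--
--     return first, second
-- ===== SOURCE B (Python) =====
-- def create_numbers(input_list):
--     first, second = 0, 0
--     for d in reversed(input_list):
--         first, second = second * 10 + d, first
--     return first, second
-- ===== Notes on version B (the rewrite author's own statement) =====
-- stated objective: simpler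
-- what changed: Instead of an index loop over range(n-1,-1,-1) with an i%2 parity branch and subscripting, B iterates the values in reverse with no indices at all, swapping the two accumulators at every step so each element lands in the right number automatically.
import Mathlib
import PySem

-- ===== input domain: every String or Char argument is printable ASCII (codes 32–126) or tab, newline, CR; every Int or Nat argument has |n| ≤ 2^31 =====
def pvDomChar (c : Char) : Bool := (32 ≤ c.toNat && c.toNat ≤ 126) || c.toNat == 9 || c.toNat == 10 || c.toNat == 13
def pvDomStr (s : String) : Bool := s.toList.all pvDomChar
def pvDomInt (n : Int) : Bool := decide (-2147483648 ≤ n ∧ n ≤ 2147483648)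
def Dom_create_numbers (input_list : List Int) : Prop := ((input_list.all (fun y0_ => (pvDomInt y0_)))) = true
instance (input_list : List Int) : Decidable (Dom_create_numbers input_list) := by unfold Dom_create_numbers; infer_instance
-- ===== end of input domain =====

-- B replaces A's descending index loop with its i % 2 parity branch by an index-free
-- reverse iteration that swaps the two accumulators at every step (objective: simpler).

-- ===== PORT A =====
-- input_list[i]: every i the range produces is in bounds, so pyGet? is always some;
-- .getD 0 only discharges the Option and its default is never the value used.
def create_numbers (input_list : List Int) : Int × Int :=
  (PySem.List.pyRange ((input_list.length : Int) - 1) (-1) (-1)).foldl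
    (fun fs i =>
      if PySem.Int.mod i 2 = 0 then
        (fs.1 * 10 + (PySem.List.pyGet? input_list i).getD 0, fs.2)
      else
        (fs.1, fs.2 * 10 + (PySem.List.pyGet? input_list i).getD 0))
    (0, 0)

-- ===== PORT B =====
def create_numbers_alt (input_list : List Int) : Int × Int :=
  input_list.reverse.foldl (fun fs d => (fs.2 * 10 + d, fs.1)) (0, 0)

-- ===== PRECONDITION & SPEC =====
def Spec_create_numbers (input_list : List Int) (out : Int × Int) : Prop := out = create_numbers_alt input_list
instance (input_list : List Int) (out : Int × Int) : Decidable (Spec_create_numbers input_list out) := by unfold Spec_create_numbers; infer_instance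

-- ===== CLAIM (what is proved, stated in full; the proofs are below) =====
def Claim_equal_create_numbers : Prop := ∀ (input_list : List Int), Dom_create_numbers input_list → Spec_create_numbers input_list (create_numbers input_list)

-- ===== LEMMAS AND PROOFS =====

-- A's loop body re-indexed over Nat indices (proof helper).
def idxStep (xs : List Int) (j : Nat) (fs : Int × Int) : Int × Int :=
  if j % 2 = 0 then (fs.1 * 10 + (xs[j]?.getD 0), fs.2)
  else (fs.1, fs.2 * 10 + (xs[j]?.getD 0))

-- range(n-1, -1, -1) is the reversed list of the Nat indices 0..n-1.
lemma pyRange_down (n : Nat) :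
    PySem.List.pyRange ((n : Int) - 1) (-1) (-1)
      = ((List.range n).map (fun j : Nat => (j : Int))).reverse := by
  simp only [PySem.List.pyRange]
  norm_num
  have hn : (if 0 < n then n else 0) = n := by split_ifs <;> omega
  rw [hn]
  apply List.ext_getElem
  · simp
  · intro i h1 h2
    simp only [List.length_map, List.length_range] at h1
    simp only [List.getElem_map, List.getElem_range, List.getElem_reverse,
      List.length_map, List.length_range]
    omega

-- A's descending foldl is the foldr of idxStep over the ascending Nat indices.
lemma A_eq_foldr (xs : List Int) :
    create_numbers xs = (List.range xs.length).foldr (idxStep xs) (0, 0) := by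
  unfold create_numbers
  rw [pyRange_down xs.length, List.foldl_reverse, List.foldr_map]
  have hfun : (fun (j:Nat) (fs:Int×Int) =>
      if PySem.Int.mod (j:Int) 2 = 0 then
        (fs.1 * 10 + (PySem.List.pyGet? xs (j:Int)).getD 0, fs.2)
      else
        (fs.1, fs.2 * 10 + (PySem.List.pyGet? xs (j:Int)).getD 0)) = idxStep xs := by
    funext j fs
    have hm : PySem.Int.mod (j:Int) 2 = ((j % 2 : Nat) : Int) := by
      simp [PySem.Int.mod, Int.fmod_eq_emod]
    rw [hm]
    simp [idxStep, PySem.List.pyGet?_natCast]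
    have hd : (2 ∣ (j:Int)) ↔ j % 2 = 0 := by omega
    simp [hd]
  rw [hfun]

lemma swap_foldr (xs : List Int) (L : List Nat) (init : Int × Int) :
    L.foldr (fun j fs => Prod.swap (idxStep xs j (Prod.swap fs))) init
      = Prod.swap (L.foldr (idxStep xs) (Prod.swap init)) := by
  induction L with
  | nil => simp
  | cons j L ih => simp [ih]

-- Shifting the index by one flips the parity branch: it is idxStep on the tail conjugated by swap.
lemma idxStep_succ (a : Int) (t : List Int) (j : Nat) (fs : Int × Int) :
    idxStep (a :: t) (j + 1) fs = Prod.swap (idxStep t j (Prod.swap fs)) := by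
  by_cases h : j % 2 = 0
  · have h2 : (j + 1) % 2 = 1 := by omega
    simp [idxStep, h, h2]
  · have h2 : (j + 1) % 2 = 0 := by omega
    simp [idxStep, h, h2]

-- The cons law both programs satisfy.
lemma keyA (a : Int) (t : List Int) :
    create_numbers (a :: t) = ((create_numbers t).2 * 10 + a, (create_numbers t).1) := by
  rw [A_eq_foldr, A_eq_foldr]
  rw [List.length_cons, List.range_succ_eq_map]
  rw [List.foldr_cons, List.foldr_map]
  have hfun : (fun (j : Nat) (fs : Int × Int) => idxStep (a :: t) (j + 1) fs)
      = fun j fs => Prod.swap (idxStep t j (Prod.swap fs)) := by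
    funext j fs; exact idxStep_succ a t j fs
  simp only [Nat.succ_eq_add_one, hfun]
  rw [swap_foldr]
  simp [idxStep]

lemma alt_cons (a : Int) (t : List Int) :
    create_numbers_alt (a :: t) = ((create_numbers_alt t).2 * 10 + a, (create_numbers_alt t).1) := by
  simp [create_numbers_alt, List.foldl_append]

lemma AB (xs : List Int) : create_numbers xs = create_numbers_alt xs := by
  induction xs with
  | nil => rfl
  | cons a t ih => rw [keyA, alt_cons, ih]

-- ===== VERDICT (by name: the statement is the Claim_ definition above) =====
theorem create_numbers_spec : Claim_equal_create_numbers := by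
  intro input_list _
  unfold Spec_create_numbers
  exact AB input_list
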